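-- pv_equiv track=rewrite | github.com/supermetalearning/AI | Analyzer.py | get_object_subgrid
-- ===== SOURCE A (Python) =====
-- def get_object_subgrid(grid, pixels, bounds):
--     """Extract a subgrid containing just the object"""
--     min_r, max_r, min_c, max_c = bounds
--     height = max_r - min_r + 1
--     width = max_c - min_c + 1
--
--     # Create empty subgrid
--     subgrid = [[0 for _ in range(width)] for _ in range(height)]
--
--     # Fill in the object pixels
--     for r, c in pixels:
--         subgrid[r - min_r][c - min_c] = grid[r][c]
--
--     return subgrid
-- ===== SOURCE B (Python) =====
-- def get_object_subgrid(grid, pixels, bounds):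
--     """Extract a subgrid containing just the object"""
--     min_r, max_r, min_c, max_c = bounds
--     values = {(r, c): grid[r][c] for r, c in pixels}
--     return [[values.get((r, c), 0)
--              for c in range(min_c, max_c + 1)]
--             for r in range(min_r, max_r + 1)]
-- ===== Notes on version B (the rewrite author's own statement) =====
-- stated objective: idiomatic
-- what changed: B first indexes the pixels in a dict (r,c)->grid[r][c] and then gathers the output with a nested comprehension over the bounding rectangle using dict.get, instead of scattering writes into a pre-allocated zero grid.
-- outside the precondition, e.g. on get_object_subgrid([[5]], [(0, 0)], (1, 1, 0, 0)): A returns [[5]], B returns [[0]]; on get_object_subgrid([[5, 6]], [(0, 1)], (0, 0, 2, 3)): A returns [[0, 6]], B returns [[0, 0]]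
import Mathlib
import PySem

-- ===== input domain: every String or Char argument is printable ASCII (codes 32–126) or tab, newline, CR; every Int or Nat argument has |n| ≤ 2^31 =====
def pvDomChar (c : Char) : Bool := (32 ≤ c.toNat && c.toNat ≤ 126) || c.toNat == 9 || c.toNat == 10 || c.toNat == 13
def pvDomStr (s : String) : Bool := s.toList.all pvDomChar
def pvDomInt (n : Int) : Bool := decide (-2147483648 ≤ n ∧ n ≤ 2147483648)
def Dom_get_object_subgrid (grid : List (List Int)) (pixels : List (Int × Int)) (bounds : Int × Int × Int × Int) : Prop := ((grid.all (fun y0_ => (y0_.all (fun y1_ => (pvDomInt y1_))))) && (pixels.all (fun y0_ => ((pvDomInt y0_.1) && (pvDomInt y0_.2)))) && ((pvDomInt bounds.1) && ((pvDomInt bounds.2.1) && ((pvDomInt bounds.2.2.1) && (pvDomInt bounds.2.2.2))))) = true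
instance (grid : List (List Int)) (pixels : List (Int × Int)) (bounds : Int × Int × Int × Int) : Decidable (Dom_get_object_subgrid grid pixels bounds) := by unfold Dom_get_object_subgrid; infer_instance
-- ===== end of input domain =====

-- B gathers over the bounding rectangle with a set-membership test instead of scattering
-- pixel writes into a pre-allocated zero grid (idiomatic rewrite, same cost).

-- ===== PORT A =====
-- Literal port of A: build the zero grid, then for each pixel assign
-- subgrid[r - min_r][c - min_c] = grid[r][c] with Python index semantics;
-- 'none' in the fold state means the Python raised (those inputs are outside Pre_).
def get_object_subgrid (grid : List (List Int)) (pixels : List (Int × Int)) (bounds : Int × Int × Int × Int) : List (List Int) :=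
  let min_r := bounds.1
  let max_r := bounds.2.1
  let min_c := bounds.2.2.1
  let max_c := bounds.2.2.2
  let height := max_r - min_r + 1
  let width := max_c - min_c + 1
  let subgrid := (PySem.List.pyRange 0 height 1).map (fun _ =>
    (PySem.List.pyRange 0 width 1).map (fun _ => (0 : Int)))
  let res := pixels.foldl (fun (acc : Option (List (List Int))) rc =>
    match acc with
    | none => none
    | some sg =>
      match PySem.List.pyGet? grid rc.1 with
      | none => none
      | some grow =>
        match PySem.List.pyGet? grow rc.2 with
        | none => none
        | some v =>
          match PySem.List.pyGet? sg (rc.1 - min_r) with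
          | none => none
          | some row =>
            match PySem.List.pySet? row (rc.2 - min_c) v with
            | none => none
            | some row' => PySem.List.pySet? sg (rc.1 - min_r) row') (some subgrid)
  res.getD []

-- ===== PORT B =====
-- Literal port of B: values = {(r,c): grid[r][c] for r,c in pixels} (a dict
-- comprehension, built as a foldl of inserts), then a nested comprehension over the
-- bounding rectangle looking each cell up with values.get((r,c), 0).
-- (grid[r][c] is ported as pyGetD: exact under Pre_, where the index is in range.)
def get_object_subgrid_alt (grid : List (List Int)) (pixels : List (Int × Int)) (bounds : Int × Int × Int × Int) : List (List Int) :=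
  let min_r := bounds.1
  let max_r := bounds.2.1
  let min_c := bounds.2.2.1
  let max_c := bounds.2.2.2
  let values : PySem.Dict (Int × Int) Int :=
    pixels.foldl (fun d rc =>
      d.insert rc (PySem.List.pyGetD (PySem.List.pyGetD grid rc.1 []) rc.2 0)) PySem.Dict.empty
  (PySem.List.pyRange min_r (max_r + 1) 1).map (fun r =>
    (PySem.List.pyRange min_c (max_c + 1) 1).map (fun c =>
      PySem.Dict.getD values (r, c) 0))

-- ===== PRECONDITION & SPEC =====
-- Pre_ excludes inputs where some pixel lies outside the stated bounds or outside the
-- grid: there A either raises IndexError or silently wraps a negative index (bounds is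
-- documented as the object's bounding box, so such inputs break the function's contract).
def Pre_get_object_subgrid (grid : List (List Int)) (pixels : List (Int × Int)) (bounds : Int × Int × Int × Int) : Prop :=
  ∀ p ∈ pixels,
    bounds.1 ≤ p.1 ∧ p.1 ≤ bounds.2.1 ∧ bounds.2.2.1 ≤ p.2 ∧ p.2 ≤ bounds.2.2.2 ∧
    0 ≤ p.1 ∧ p.1 < (grid.length : Int) ∧
    0 ≤ p.2 ∧ p.2 < ((grid.getD p.1.toNat []).length : Int)
instance (grid : List (List Int)) (pixels : List (Int × Int)) (bounds : Int × Int × Int × Int) : Decidable (Pre_get_object_subgrid grid pixels bounds) := by unfold Pre_get_object_subgrid; infer_instance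

def pvWitness_get_object_subgrid : List (List Int) × (List (Int × Int)) × (Int × Int × Int × Int) :=
  ([[1, 2], [3, 4]], [(0, 1), (1, 1)], (0, 1, 1, 1))

def Spec_get_object_subgrid (grid : List (List Int)) (pixels : List (Int × Int)) (bounds : Int × Int × Int × Int) (out : List (List Int)) : Prop := out = get_object_subgrid_alt grid pixels bounds
instance (grid : List (List Int)) (pixels : List (Int × Int)) (bounds : Int × Int × Int × Int) (out : List (List Int)) : Decidable (Spec_get_object_subgrid grid pixels bounds out) := by unfold Spec_get_object_subgrid; infer_instance

-- ===== CLAIM (what is proved, stated in full; the proofs are below) =====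
def Claim_equal_get_object_subgrid : Prop := ∀ (grid : List (List Int)) (pixels : List (Int × Int)) (bounds : Int × Int × Int × Int), Dom_get_object_subgrid grid pixels bounds → Pre_get_object_subgrid grid pixels bounds → Spec_get_object_subgrid grid pixels bounds (get_object_subgrid grid pixels bounds)

-- ===== LEMMAS AND PROOFS =====

-- the value A writes / B gathers at an in-grid position
def pvVal (grid : List (List Int)) (p : Int × Int) : Int :=
  (grid.getD p.1.toNat []).getD p.2.toNat 0

-- the in-contract condition for one pixel (= the body of Pre_)
def pvOK (grid : List (List Int)) (min_r max_r min_c max_c : Int) (p : Int × Int) : Prop :=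
  min_r ≤ p.1 ∧ p.1 ≤ max_r ∧ min_c ≤ p.2 ∧ p.2 ≤ max_c ∧
  0 ≤ p.1 ∧ p.1 < (grid.length : Int) ∧
  0 ≤ p.2 ∧ p.2 < ((grid.getD p.1.toNat []).length : Int)

-- A's fold returns `some`, preserves the matrix shape, and its entry (i,j) is
-- pvVal at (min_r+i, min_c+j) when that position is a pixel, else the old entry.
theorem pvFoldSpec (grid : List (List Int)) (min_r max_r min_c max_c : Int)
    (pixels : List (Int × Int)) (sg : List (List Int))
    (hpx : ∀ p ∈ pixels, pvOK grid min_r max_r min_c max_c p)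
    (hlen : (sg.length : Int) = max_r - min_r + 1)
    (hrow : ∀ row ∈ sg, (row.length : Int) = max_c - min_c + 1) :
    ∃ sg',
      pixels.foldl (fun (acc : Option (List (List Int))) rc =>
        match acc with
        | none => none
        | some sg =>
          match PySem.List.pyGet? grid rc.1 with
          | none => none
          | some grow =>
            match PySem.List.pyGet? grow rc.2 with
            | none => none
            | some v =>
              match PySem.List.pyGet? sg (rc.1 - min_r) with
              | none => none
              | some row =>
                match PySem.List.pySet? row (rc.2 - min_c) v with
                | none => none
                | some row' => PySem.List.pySet? sg (rc.1 - min_r) row') (some sg) = some sg' ∧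
      (sg'.length : Int) = max_r - min_r + 1 ∧
      (∀ row ∈ sg', (row.length : Int) = max_c - min_c + 1) ∧
      (∀ i j : Nat, (i : Int) < max_r - min_r + 1 → (j : Int) < max_c - min_c + 1 →
        (sg'.getD i []).getD j 0 =
          if (min_r + (i : Int), min_c + (j : Int)) ∈ pixels then pvVal grid (min_r + i, min_c + j)
          else (sg.getD i []).getD j 0) := by
  induction pixels generalizing sg with
  | nil =>
    exact ⟨sg, rfl, hlen, hrow, by intro i j hi hj; simp⟩
  | cons p ps ih =>
    obtain ⟨h1, h2, h3, h4, h5, h6, h7, h8⟩ := hpx p (List.mem_cons_self ..)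
    have hp1 : p.1.toNat < grid.length := by omega
    set grow := grid.getD p.1.toNat [] with hgrowdef
    have hp2 : p.2.toNat < grow.length := by omega
    set a := (p.1 - min_r).toNat with hadef
    set b := (p.2 - min_c).toNat with hbdef
    have ha1 : (a : Int) = p.1 - min_r := Int.toNat_of_nonneg (by omega)
    have hb1 : (b : Int) = p.2 - min_c := Int.toNat_of_nonneg (by omega)
    have haH : a < sg.length := by omega
    set row := sg.getD a [] with hrowdef
    have hrowmem : row ∈ sg := by rw [hrowdef, List.getD_eq_getElem _ _ haH]; exact List.getElem_mem haH
    have hrowlen : (row.length : Int) = max_c - min_c + 1 := hrow row hrowmem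
    have hbW : b < row.length := by omega
    have hg : PySem.List.pyGet? grid p.1 = some grow := by
      rw [PySem.List.pyGet?_of_nonneg grid h5, List.getElem?_eq_getElem hp1,
        hgrowdef, List.getD_eq_getElem _ _ hp1]
    have hg2 : PySem.List.pyGet? grow p.2 = some (pvVal grid p) := by
      rw [PySem.List.pyGet?_of_nonneg grow h7, List.getElem?_eq_getElem hp2]
      have : pvVal grid p = grow[p.2.toNat] := by
        simp only [pvVal, ← hgrowdef]
        rw [List.getD_eq_getElem _ _ hp2]
      rw [this]
    have hs1 : PySem.List.pyGet? sg (p.1 - min_r) = some row := by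
      rw [PySem.List.pyGet?_of_nonneg sg (by omega : (0:Int) ≤ p.1 - min_r), ← hadef, List.getElem?_eq_getElem haH,
        hrowdef, List.getD_eq_getElem _ _ haH]
    set row' := row.set b (pvVal grid p) with hrow'def
    have hset1 : PySem.List.pySet? row (p.2 - min_c) (pvVal grid p) = some row' := by
      rw [← hb1]; exact PySem.List.pySet?_natCast row b (pvVal grid p) hbW
    set sg1 := sg.set a row' with hsg1def
    have hset2 : PySem.List.pySet? sg (p.1 - min_r) row' = some sg1 := by
      rw [← ha1]; exact PySem.List.pySet?_natCast sg a row' haH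
    have hlen1 : (sg1.length : Int) = max_r - min_r + 1 := by
      rw [hsg1def, List.length_set]; exact hlen
    have hrow1 : ∀ r ∈ sg1, (r.length : Int) = max_c - min_c + 1 := by
      intro r hr
      rw [hsg1def] at hr
      obtain ⟨k, hk, rfl⟩ := List.mem_iff_getElem.1 hr
      rw [List.getElem_set]
      split
      · rw [hrow'def, List.length_set]; exact hrowlen
      · exact hrow _ (List.getElem_mem (by simpa using hk))
    obtain ⟨sg', hfold, hl', hr', hent⟩ := ih sg1
      (fun q hq => hpx q (List.mem_cons_of_mem _ hq)) hlen1 hrow1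
    refine ⟨sg', ?_, hl', hr', ?_⟩
    · rw [List.foldl_cons]
      simp only [hg, hg2, hs1, hset1, hset2]
      exact hfold
    · intro i j hi hj
      rw [hent i j hi hj]
      have hiH : i < sg.length := by omega
      have hjW : j < row.length := by omega
      have hpeq : (p = (min_r + (i : Int), min_c + (j : Int))) ↔ (a = i ∧ b = j) := by
        rw [Prod.ext_iff]
        constructor
        · rintro ⟨e1, e2⟩; constructor <;> omega
        · rintro ⟨e1, e2⟩; constructor <;> simp <;> omega
      have houter : sg1.getD i [] = if a = i then row' else sg.getD i [] := by
        rw [hsg1def,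
          List.getD_eq_getElem _ _ (show i < (sg.set a row').length by simpa using hiH),
          List.getElem_set]
        split
        · rfl
        · rw [List.getD_eq_getElem _ _ hiH]
      have hentry1 : (sg1.getD i []).getD j 0 =
          if a = i ∧ b = j then pvVal grid p else (sg.getD i []).getD j 0 := by
        rw [houter]
        by_cases hai : a = i
        · rw [if_pos hai, hrow'def,
            List.getD_eq_getElem _ _ (show j < (row.set b (pvVal grid p)).length by
              simpa using hjW),
            List.getElem_set]
          by_cases hbj : b = j
          · rw [if_pos hbj, if_pos ⟨hai, hbj⟩]
          · rw [if_neg hbj, if_neg (by tauto), ← hai, ← hrowdef,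
              List.getD_eq_getElem _ _ hjW]
        · rw [if_neg hai, if_neg (by tauto)]
      rw [hentry1]
      by_cases hmem : (min_r + (i : Int), min_c + (j : Int)) ∈ ps
      · simp [hmem, List.mem_cons]
      · by_cases hpp : p = (min_r + (i : Int), min_c + (j : Int))
        · rw [if_pos (hpeq.1 hpp), hpp, if_pos (List.mem_cons_self ..)]
          exact ite_self _
        · have hab : ¬ (a = i ∧ b = j) := fun h => hpp (hpeq.2 h)
          have hpp' : (min_r + (i : Int), min_c + (j : Int)) ≠ p := fun h => hpp h.symm
          simp [hmem, List.mem_cons, hpp', hab]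

-- the zero-element getD of a constant-zero map
theorem pvGetDZero {α : Type} (l : List α) (j : Nat) :
    (l.map (fun _ => (0 : Int))).getD j 0 = 0 := by
  rcases h : (l.map (fun _ => (0 : Int)))[j]? with _ | v
  · simp [List.getD]
  · have := List.mem_of_getElem? h
    simp only [List.mem_map] at this
    obtain ⟨_, _, rfl⟩ := this
    simp [List.getD]

-- looking up in the dict built by B's comprehension: membership decides the value,
-- and the value is a function of the key alone, so the last write equals any write
theorem pvDictSpec (grid : List (List Int)) (pixels : List (Int × Int))
    (d : PySem.Dict (Int × Int) Int) (q : Int × Int) :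
    (pixels.foldl (fun d rc =>
        d.insert rc (PySem.List.pyGetD (PySem.List.pyGetD grid rc.1 []) rc.2 0)) d).getD q 0 =
      if q ∈ pixels then PySem.List.pyGetD (PySem.List.pyGetD grid q.1 []) q.2 0
      else d.getD q 0 := by
  induction pixels generalizing d with
  | nil => simp
  | cons p ps ih =>
    rw [List.foldl_cons, ih]
    by_cases hq : q ∈ ps
    · simp [hq, List.mem_cons]
    · rw [if_neg hq, PySem.Dict.getD_insert]
      by_cases hqp : q = p
      · rw [if_pos hqp, if_pos (by simp [List.mem_cons, hqp]), hqp]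
      · rw [if_neg hqp, if_neg (by simp [List.mem_cons, hqp, hq])]

-- empty-pixel list: the zero grid equals B's all-zero gather
theorem pvEmptyCase (grid : List (List Int)) (min_r max_r min_c max_c : Int) :
    (PySem.List.pyRange 0 (max_r - min_r + 1) 1).map (fun _ =>
      (PySem.List.pyRange 0 (max_c - min_c + 1) 1).map (fun _ => (0 : Int))) =
    get_object_subgrid_alt grid [] (min_r, max_r, min_c, max_c) := by
  unfold get_object_subgrid_alt
  dsimp only
  simp only [List.foldl_nil, PySem.Dict.getD_empty, List.map_const']
  rw [PySem.List.length_pyRange_one, PySem.List.length_pyRange_one,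
    PySem.List.length_pyRange_one, PySem.List.length_pyRange_one]
  congr 2 <;> omega

-- ===== VERDICT (by name: the statement is the Claim_ definition above) =====
theorem get_object_subgrid_spec : Claim_equal_get_object_subgrid := by
  unfold Claim_equal_get_object_subgrid
  intro grid pixels bounds _ hpre
  obtain ⟨min_r, max_r, min_c, max_c⟩ := bounds
  have hpx : ∀ p ∈ pixels, pvOK grid min_r max_r min_c max_c p := by
    intro p hp; exact hpre p hp
  unfold Spec_get_object_subgrid get_object_subgrid
  dsimp only
  rcases pixels with _ | ⟨p0, ps⟩
  · simpa using pvEmptyCase grid min_r max_r min_c max_c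
  · obtain ⟨h1, h2, h3, h4, _, _, _, _⟩ := hpx p0 (List.mem_cons_self ..)
    have hH : 0 < max_r - min_r + 1 := by omega
    have hW : 0 < max_c - min_c + 1 := by omega
    have hlen0 : (((PySem.List.pyRange 0 (max_r - min_r + 1) 1).map (fun _ =>
        (PySem.List.pyRange 0 (max_c - min_c + 1) 1).map (fun _ => (0 : Int)))).length : Int)
        = max_r - min_r + 1 := by
      rw [List.length_map, PySem.List.length_pyRange_one]; omega
    have hrow0 : ∀ row ∈ (PySem.List.pyRange 0 (max_r - min_r + 1) 1).map (fun _ =>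
        (PySem.List.pyRange 0 (max_c - min_c + 1) 1).map (fun _ => (0 : Int))),
        (row.length : Int) = max_c - min_c + 1 := by
      intro row hrow
      obtain ⟨_, _, rfl⟩ := List.mem_map.1 hrow
      rw [List.length_map, PySem.List.length_pyRange_one]; omega
    obtain ⟨sg', hfold, hl', hr', hent⟩ :=
      pvFoldSpec grid min_r max_r min_c max_c (p0 :: ps) _ hpx hlen0 hrow0
    rw [hfold, Option.getD_some]
    unfold get_object_subgrid_alt
    dsimp only
    apply List.ext_getElem
    · rw [List.length_map, PySem.List.length_pyRange_one]; omega
    · intro i hi1 hi2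
      rw [List.getElem_map, PySem.List.getElem_pyRange_one]
      have hiI : (i : Int) < max_r - min_r + 1 := by
        rw [List.length_map, PySem.List.length_pyRange_one] at hi2; omega
    -- inner rows
      have hleni : (sg'[i].length : Int) = max_c - min_c + 1 :=
        hr' _ (List.getElem_mem hi1)
      apply List.ext_getElem
      · rw [List.length_map, PySem.List.length_pyRange_one]; omega
      · intro j hj1 hj2
        have hjI : (j : Int) < max_c - min_c + 1 := by omega
        rw [List.getElem_map, PySem.List.getElem_pyRange_one]
        have hLHS : sg'[i][j] = (sg'.getD i []).getD j 0 := by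
          rw [List.getD_eq_getElem _ _ hi1, List.getD_eq_getElem _ _ hj1]
        rw [hLHS, hent i j hiI hjI, pvDictSpec]
        by_cases hmem : (min_r + (i : Int), min_c + (j : Int)) ∈ p0 :: ps
        · rw [if_pos hmem, if_pos hmem]
          obtain ⟨_, _, _, _, g5, g6, g7, g8⟩ := hpx _ hmem
          have hg6 : (min_r + (i : Int)).toNat < grid.length := by omega
          have hrow8 : (min_c + (j : Int)) < ((grid[(min_r + (i : Int)).toNat]).length : Int) := by
            rw [← List.getD_eq_getElem grid [] hg6]
            exact g8
          rw [PySem.List.pyGetD_eq_getElem _ _ g5 g6,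
            PySem.List.pyGetD_eq_getElem _ _ g7 hrow8]
          simp only [pvVal]
          rw [List.getD_eq_getElem _ _ hg6,
            List.getD_eq_getElem _ _ (by omega : (min_c + (j : Int)).toNat < (grid[(min_r + (i : Int)).toNat]).length)]
        · rw [if_neg hmem, if_neg hmem, PySem.Dict.getD_empty]
          have hiZ : i < ((PySem.List.pyRange 0 (max_r - min_r + 1) 1).map (fun _ =>
              (PySem.List.pyRange 0 (max_c - min_c + 1) 1).map (fun _ => (0 : Int)))).length := by
            rw [List.length_map, PySem.List.length_pyRange_one]; omega
          rw [List.getD_eq_getElem _ _ hiZ, List.getElem_map]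
          exact pvGetDZero _ j
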